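-- pv_equiv track=rewrite | github.com/xlreon/python-programs-catalog | questions/Recursion/substring.py | makeSubstring
-- ===== SOURCE A (Python) =====
-- def makeSubstring(a,b):
--
--     tableA = {}
--     tableB = {}
--     maxCount = 0
--     if len(a) == 0 or len(b) == 0:
--         return 0
--     for i in a:
--         tableA[i] = 1
--     for i in b:
--         if i not in tableA:
--             return -1
--         if i not in tableB:
--             tableB[i] = 1
--         else:
--             tableB[i] += 1
--     for i in a:
--         if i not in tableB:
--             return -1
--     for key in tableB:
--         if tableB[key] >= maxCount:
--             maxCount = tableB[key]
--     return maxCount+1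
-- ===== SOURCE B (Python) =====
-- def makeSubstring(a, b):
--     if not a or not b:
--         return 0
--     if set(a) != set(b):
--         return -1
--     s = sorted(b)
--     prev = s[0]
--     run = 1
--     best = 1
--     for c in s[1:]:
--         if c == prev:
--             run += 1
--             best = max(best, run)
--         else:
--             prev = c
--             run = 1
--     return best + 1
-- ===== Notes on version B (the rewrite author's own statement) =====
-- stated objective: alternative
-- what changed: Replaces A's two hash tables, three validation loops and dict max-scan by a set-equality guard followed by sorting b's characters and a run-length scan of the sorted list (longest run of equal adjacent characters = max frequency).
import Mathlib
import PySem

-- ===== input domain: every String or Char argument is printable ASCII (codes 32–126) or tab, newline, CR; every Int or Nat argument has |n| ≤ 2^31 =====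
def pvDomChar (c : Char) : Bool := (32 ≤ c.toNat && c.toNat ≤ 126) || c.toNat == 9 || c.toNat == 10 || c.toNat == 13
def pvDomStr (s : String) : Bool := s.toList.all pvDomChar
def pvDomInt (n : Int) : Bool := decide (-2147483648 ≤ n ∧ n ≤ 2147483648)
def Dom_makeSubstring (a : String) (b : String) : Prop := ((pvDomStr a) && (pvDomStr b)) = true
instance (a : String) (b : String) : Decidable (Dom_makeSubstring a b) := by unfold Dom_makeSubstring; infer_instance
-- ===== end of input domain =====

-- B replaces A's two hash tables, three early-return loops and dict max-scan by a set-equality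
-- guard plus sorting b's characters and a run-length scan of the sorted list (alternative algorithm).


-- ===== PORT A =====
-- 'for i in b: if i not in tableA: return -1; count into tableB' (none = the early return -1)
def msLoopB (tA : PySem.Dict Char Int) : List Char → PySem.Dict Char Int → Option (PySem.Dict Char Int)
  | [], tB => some tB
  | c :: rest, tB =>
    if tA.contains c = false then none
    else if tB.contains c = false then msLoopB tA rest (tB.insert c 1)
    else msLoopB tA rest (tB.modify c 0 (· + 1))

-- 'for i in a: if i not in tableB: return -1' (false = the early return -1)
def msCheckA (tB : PySem.Dict Char Int) : List Char → Bool
  | [] => true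
  | c :: rest => if tB.contains c = false then false else msCheckA tB rest

-- 'for key in tableB: if tableB[key] >= maxCount: maxCount = tableB[key]'
def msMaxLoop (tB : PySem.Dict Char Int) : List Char → Int → Int
  | [], m => m
  | k :: rest, m =>
    if tB.getD k 0 ≥ m then msMaxLoop tB rest (tB.getD k 0) else msMaxLoop tB rest m

def makeSubstring (a : String) (b : String) : Int :=
  if PySem.Str.len a = 0 ∨ PySem.Str.len b = 0 then 0
  else
    match msLoopB (a.toList.foldl (fun d c => d.insert c (1 : Int)) PySem.Dict.empty)
        b.toList PySem.Dict.empty with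
    | none => -1
    | some tB =>
      if msCheckA tB a.toList = false then -1
      else msMaxLoop tB tB.keys 0 + 1

-- ===== PORT B =====
-- 'for c in s[1:]: if c == prev: run += 1; best = max(best, run) else: prev = c; run = 1'
def msRun : List Char → Char → Int → Int → Int
  | [], _, _, best => best
  | c :: rest, prev, run, best =>
    if c = prev then msRun rest prev (run + 1) (max best (run + 1))
    else msRun rest c 1 best

-- 'prev = s[0]; scan s[1:]' ([] unreachable in context: b is nonempty, Python reads s[0])
def msScan : List Char → Int
  | [] => 0
  | c :: rest => msRun rest c 1 1 + 1

def makeSubstring_alt (a : String) (b : String) : Int :=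
  if a.toList = [] ∨ b.toList = [] then 0
  else if ¬ (PySem.Set.equal (PySem.Set.ofList a.toList) (PySem.Set.ofList b.toList) = true) then -1
  else msScan (PySem.List.sorted b.toList (fun c => c) false)

-- ===== PRECONDITION & SPEC =====
def Spec_makeSubstring (a : String) (b : String) (out : Int) : Prop := out = makeSubstring_alt a b
instance (a : String) (b : String) (out : Int) : Decidable (Spec_makeSubstring a b out) := by unfold Spec_makeSubstring; infer_instance

-- ===== CLAIM (what is proved, stated in full; the proofs are below) =====
def Claim_equal_makeSubstring : Prop := ∀ (a : String) (b : String), Dom_makeSubstring a b → Spec_makeSubstring a b (makeSubstring a b)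

-- ===== LEMMAS AND PROOFS =====

theorem msLoopB_none (tA : PySem.Dict Char Int) (lb : List Char)
    (h : ∃ c ∈ lb, tA.contains c = false) (acc : PySem.Dict Char Int) :
    msLoopB tA lb acc = none := by
  induction lb generalizing acc with
  | nil => rcases h with ⟨c, hc, _⟩; cases hc
  | cons c rest ih =>
    simp only [msLoopB]
    by_cases hc : tA.contains c = false
    · simp [hc]
    · rcases h with ⟨d, hd, hdf⟩
      rcases List.mem_cons.mp hd with rfl | hd'
      · exact absurd hdf hc
      · simp [hc, ih ⟨d, hd', hdf⟩]

theorem msLoopB_some (tA : PySem.Dict Char Int) (lb : List Char)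
    (h : ∀ c ∈ lb, tA.contains c = true) (acc : PySem.Dict Char Int) :
    msLoopB tA lb acc = some (lb.foldl (fun d x => d.modify x 0 (· + 1)) acc) := by
  induction lb generalizing acc with
  | nil => rfl
  | cons c rest ih =>
    have hc : tA.contains c = true := h c (by simp)
    have hrest : ∀ x ∈ rest, tA.contains x = true := fun x hx => h x (by simp [hx])
    simp only [msLoopB, hc, List.foldl_cons]
    by_cases hb : acc.contains c = false
    · have : acc.modify c 0 (· + 1) = acc.insert c 1 := by
        unfold PySem.Dict.modify
        rw [PySem.Dict.getD_of_not_contains acc 0 hb]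
        norm_num
      simp [hb, this, ih hrest]
    · simp [hb, ih hrest]

theorem msCheckA_iff (tB : PySem.Dict Char Int) (la : List Char) :
    msCheckA tB la = true ↔ ∀ c ∈ la, tB.contains c = true := by
  induction la with
  | nil => simp [msCheckA]
  | cons c rest ih =>
    by_cases hc : tB.contains c = false
    · simp [msCheckA, hc]
    · rw [Bool.not_eq_false] at hc
      simp [msCheckA, hc, ih]

theorem msMaxLoop_eq (tB : PySem.Dict Char Int) (ks : List Char) (m : Int) :
    msMaxLoop tB ks m = ks.foldl (fun m k => max m (tB.getD k 0)) m := by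
  induction ks generalizing m with
  | nil => rfl
  | cons k rest ih =>
    simp only [msMaxLoop, List.foldl_cons]
    by_cases h : tB.getD k 0 ≥ m
    · rw [if_pos h, ih, max_eq_right h]
    · rw [if_neg h, ih, max_eq_left (le_of_not_ge h)]

theorem foldl_insert_one_mem (la : List Char) (c : Char) :
    (la.foldl (fun d c => d.insert c (1 : Int)) PySem.Dict.empty).contains c = true ↔ c ∈ la := by
  rw [PySem.Dict.contains_iff_mem_keys, PySem.Dict.keys_foldl_insert, PySem.Set.mem_update]
  simp [PySem.Dict.keys_empty]

-- extremal characterization of 'foldl max (f k)'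
theorem foldlMax_spec (f : Char → Int) (ks : List Char) (a : Int) :
    a ≤ ks.foldl (fun m k => max m (f k)) a ∧
    (∀ k ∈ ks, f k ≤ ks.foldl (fun m k => max m (f k)) a) ∧
    (ks.foldl (fun m k => max m (f k)) a = a ∨ ∃ k ∈ ks, ks.foldl (fun m k => max m (f k)) a = f k) := by
  induction ks generalizing a with
  | nil => exact ⟨le_refl _, by simp, Or.inl rfl⟩
  | cons k t ih =>
    obtain ⟨h1, h2, h3⟩ := ih (max a (f k))
    refine ⟨le_trans (le_max_left _ _) h1, ?_, ?_⟩
    · intro k' hk'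
      rcases List.mem_cons.mp hk' with rfl | hk'
      · exact le_trans (le_max_right _ _) h1
      · exact h2 k' hk'
    · rcases h3 with h3 | ⟨k', hk', h3⟩
      · rcases max_choice a (f k) with hm | hm
        · exact Or.inl (by rw [List.foldl_cons, h3, hm])
        · exact Or.inr ⟨k, by simp, by rw [List.foldl_cons, h3, hm]⟩
      · exact Or.inr ⟨k', by simp [hk'], by rw [List.foldl_cons, h3]⟩

-- proof-side closed form of B's run-length scan
def runMax : List Char → Char → Int → Int
  | [], _, run => run
  | c :: rest, prev, run =>
    if c = prev then runMax rest prev (run + 1) else max run (runMax rest c 1)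

theorem le_runMax (l : List Char) (prev : Char) (run : Int) : run ≤ runMax l prev run := by
  induction l generalizing prev run with
  | nil => exact le_refl _
  | cons c rest ih =>
    simp only [runMax]
    by_cases hc : c = prev
    · rw [if_pos hc]
      exact le_trans (by omega) (ih prev (run + 1))
    · rw [if_neg hc]
      exact le_max_left _ _

theorem msRun_eq (l : List Char) (prev : Char) (run best : Int)
    (h1 : 1 ≤ run) (h2 : run ≤ best) :
    msRun l prev run best = max best (runMax l prev run) := by
  induction l generalizing prev run best with
  | nil =>
    simp only [msRun, runMax]
    exact (max_eq_left h2).symm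
  | cons c rest ih =>
    simp only [msRun, runMax]
    by_cases hc : c = prev
    · rw [if_pos hc, if_pos hc,
        ih prev (run + 1) (max best (run + 1)) (by omega) (le_max_right _ _)]
      rw [max_assoc]
      congr 1
      exact max_eq_right (le_runMax rest prev (run + 1))
    · rw [if_neg hc, if_neg hc, ih c 1 best (le_refl _) (le_trans h1 h2)]
      rw [← max_assoc, max_eq_left h2]

-- on a sorted tail: runMax is bounded below by every character count and attains one of them
theorem runMax_spec (l : List Char) (prev : Char) (run : Int)
    (hs : l.Pairwise (· ≤ ·)) (hlb : ∀ x ∈ l, prev ≤ x) (hr : 1 ≤ run) :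
    (run + (l.count prev : Int) ≤ runMax l prev run) ∧
    (∀ c ∈ l, c ≠ prev → (l.count c : Int) ≤ runMax l prev run) ∧
    (runMax l prev run = run + (l.count prev : Int) ∨
      ∃ c ∈ l, c ≠ prev ∧ runMax l prev run = (l.count c : Int)) := by
  induction l generalizing prev run with
  | nil => exact ⟨by simp [runMax], by simp, Or.inl (by simp [runMax])⟩
  | cons d t ih =>
    rw [List.pairwise_cons] at hs
    obtain ⟨hdle, hts⟩ := hs
    by_cases hd : d = prev
    · subst hd
      obtain ⟨i1, i2, i3⟩ := ih d (run + 1) hts hdle (by omega)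
      simp only [runMax, if_pos rfl]
      refine ⟨?_, ?_, ?_⟩
      · simp only [List.count_cons, beq_self_eq_true, if_pos]
        push_cast
        omega
      · intro c hc hne
        rcases List.mem_cons.mp hc with rfl | hc
        · exact absurd rfl hne
        · have : (d :: t).count c = t.count c := by
            simp [List.count_cons, Ne.symm hne]
          rw [this]
          exact i2 c hc hne
      · rcases i3 with i3 | ⟨c, hc, hne, i3⟩
        · refine Or.inl ?_
          rw [i3]
          simp only [List.count_cons, beq_self_eq_true, if_pos]
          push_cast
          omega
        · refine Or.inr ⟨c, by simp [hc], hne, ?_⟩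
          rw [i3]
          simp [List.count_cons, Ne.symm hne]
    · -- prev < d ≤ every element of t, so prev does not occur in d :: t
      have hprevd : prev < d := lt_of_le_of_ne (hlb d (by simp)) (fun h => hd h.symm)
      have hnotin : prev ∉ d :: t := by
        intro hmem
        rcases List.mem_cons.mp hmem with rfl | hmem
        · exact hd rfl
        · exact absurd (hdle prev hmem) (not_le.mpr hprevd)
      have hcnt0 : (d :: t).count prev = 0 := List.count_eq_zero.mpr hnotin
      obtain ⟨i1, i2, i3⟩ := ih d 1 hts hdle (le_refl _)
      simp only [runMax, if_neg (fun h => hd h)]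
      refine ⟨?_, ?_, ?_⟩
      · rw [hcnt0]
        simp [le_max_left]
      · intro c hc hne
        rcases List.mem_cons.mp hc with rfl | hc
        · refine le_trans ?_ (le_trans i1 (le_max_right _ _))
          simp only [List.count_cons, beq_self_eq_true, if_pos]
          push_cast
          omega
        · by_cases hcd : c = d
          · subst hcd
            refine le_trans ?_ (le_trans i1 (le_max_right _ _))
            simp only [List.count_cons, beq_self_eq_true, if_pos]
            push_cast
            omega
          · have : (d :: t).count c = t.count c := by simp [List.count_cons, Ne.symm hcd]
            rw [this]
            exact le_trans (i2 c hc hcd) (le_max_right _ _)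
      · rcases max_choice run (runMax t d 1) with hm | hm
        · refine Or.inl ?_
          rw [hm, hcnt0]
          simp
        · rw [hm]
          rcases i3 with i3 | ⟨c, hc, hne, i3⟩
          · refine Or.inr ⟨d, by simp, fun h => hd h, ?_⟩
            rw [i3]
            simp only [List.count_cons, beq_self_eq_true, if_pos]
            push_cast
            omega
          · have hcprev : c ≠ prev := by
              intro h
              exact hnotin (by simp [← h, hc])
            refine Or.inr ⟨c, by simp [hc], hcprev, ?_⟩
            rw [i3]
            simp [List.count_cons, Ne.symm hne]

theorem makeSubstring_eq_alt (a b : String) : makeSubstring a b = makeSubstring_alt a b := by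
  unfold makeSubstring makeSubstring_alt
  have hlen : (PySem.Str.len a = 0 ∨ PySem.Str.len b = 0) ↔ (a.toList = [] ∨ b.toList = []) := by
    simp [PySem.Str.len]
  by_cases hemp : a.toList = [] ∨ b.toList = []
  · rw [if_pos (hlen.mpr hemp), if_pos hemp]
  · rw [if_neg (fun h => hemp (hlen.mp h)), if_neg hemp]
    push_neg at hemp
    obtain ⟨ha, hb⟩ := hemp
    set la := a.toList
    set lb := b.toList
    by_cases hba : ∀ c ∈ lb, c ∈ la
    · -- every char of b occurs in a: the counting loop completes and tableB = Counter(b)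
      have hcontains : ∀ c ∈ lb, (la.foldl (fun d c => d.insert c (1 : Int)) PySem.Dict.empty).contains c = true := by
        intro c hc
        exact (foldl_insert_one_mem la c).mpr (hba c hc)
      rw [msLoopB_some _ _ hcontains, ← PySem.Dict.counter_eq_foldl]
      by_cases hab : ∀ c ∈ la, c ∈ lb
      · -- equal character sets: both compute max frequency + 1
        have hset : PySem.Set.equal (PySem.Set.ofList la) (PySem.Set.ofList lb) = true := by
          rw [PySem.Set.equal_iff]
          intro x
          rw [PySem.Set.mem_ofList, PySem.Set.mem_ofList]
          exact ⟨hab x, hba x⟩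
        have hchk : msCheckA (PySem.Dict.counter lb) la = true := by
          rw [msCheckA_iff]
          intro c hc
          rw [PySem.Dict.contains_counter]
          exact List.contains_iff_mem.mpr (hab c hc)
        simp only [hchk, hset, not_true, Bool.true_eq_false, if_false]
        -- A's side: foldl max over the counter's keys of the counts
        rw [msMaxLoop_eq, PySem.Dict.keys_counter]
        have hAeq : (PySem.Set.ofList lb).foldl (fun m k => max m ((PySem.Dict.counter lb).getD k 0)) 0
            = (PySem.Set.ofList lb).foldl (fun m k => max m ((lb.count k : Int))) 0 := by
          apply List.foldl_ext
          intro m k hk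
          rw [PySem.Dict.getD_counter]
        rw [hAeq]
        -- B's side: the run-length scan of sorted(b)
        obtain ⟨c0, rest, hsb⟩ : ∃ c0 rest, PySem.List.sorted lb (fun c => c) false = c0 :: rest := by
          cases hsb : PySem.List.sorted lb (fun c => c) false with
          | nil => exact absurd ((PySem.List.sorted_eq_nil_iff lb (fun c => c) false).mp hsb) hb
          | cons c0 rest => exact ⟨c0, rest, rfl⟩
        rw [hsb]
        have hperm : (c0 :: rest).Perm lb := hsb ▸ PySem.List.sorted_perm lb (fun c => c) false
        have hpair : (c0 :: rest).Pairwise (· ≤ ·) := by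
          have := PySem.List.sorted_pairwise lb (fun c => c)
          rw [hsb] at this
          exact this
        rw [List.pairwise_cons] at hpair
        obtain ⟨hc0le, hrestp⟩ := hpair
        -- counts in lb = counts in the sorted list
        have hcount : ∀ x, lb.count x = (c0 :: rest).count x := fun x => (hperm.count_eq x).symm
        have hmem : ∀ x, x ∈ lb ↔ x ∈ c0 :: rest := fun x => ⟨fun h => hperm.mem_iff.mpr h, fun h => hperm.mem_iff.mp h⟩
        -- B's value
        obtain ⟨r1, r2, r3⟩ := runMax_spec rest c0 1 hrestp hc0le (le_refl _)
        have hbest : msRun rest c0 1 1 = runMax rest c0 1 := by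
          rw [msRun_eq rest c0 1 1 (le_refl _) (le_refl _)]
          exact max_eq_right (le_runMax rest c0 1)
        set B := runMax rest c0 1 with hBdef
        have hB1 : 1 ≤ B := le_runMax rest c0 1
        -- B bounds every count of lb and attains one
        have hBub : ∀ c ∈ lb, (lb.count c : Int) ≤ B := by
          intro c hc
          rw [hcount c]
          by_cases hcc : c = c0
          · subst hcc
            refine le_trans ?_ r1
            simp only [List.count_cons, beq_self_eq_true, if_pos]
            push_cast
            omega
          · have hcr : c ∈ rest := by
              rcases List.mem_cons.mp ((hmem c).mp hc) with rfl | h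
              · exact absurd rfl hcc
              · exact h
            have : (c0 :: rest).count c = rest.count c := by simp [List.count_cons, Ne.symm hcc]
            rw [this]
            exact r2 c hcr hcc
        have hBat : ∃ c ∈ lb, B = (lb.count c : Int) := by
          rcases r3 with r3 | ⟨c, hc, hne, r3⟩
          · refine ⟨c0, (hmem c0).mpr (by simp), ?_⟩
            rw [hcount c0, r3]
            simp only [List.count_cons, beq_self_eq_true, if_pos]
            push_cast
            omega
          · refine ⟨c, (hmem c).mpr (by simp [hc]), ?_⟩
            rw [hcount c, r3]
            simp [List.count_cons, Ne.symm hne]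
        -- A's value: same characterization via foldlMax_spec
        obtain ⟨a1, a2, a3⟩ := foldlMax_spec (fun k => (lb.count k : Int)) (PySem.Set.ofList lb) 0
        set A := (PySem.Set.ofList lb).foldl (fun m k => max m ((lb.count k : Int))) 0 with hAdef
        have hAB : A = B := by
          apply le_antisymm
          · rcases a3 with a3 | ⟨k, hk, a3⟩
            · rw [a3]; omega
            · rw [a3]
              exact hBub k ((PySem.Set.mem_ofList lb k).mp hk)
          · obtain ⟨c, hc, hcB⟩ := hBat
            rw [hcB]
            exact a2 c ((PySem.Set.mem_ofList lb c).mpr hc)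
        simp only [msScan]
        rw [hbest, hAB]
      · -- some char of a is missing from b: A's third loop and B's set guard both give -1
        push_neg at hab
        obtain ⟨c, hca, hcb⟩ := hab
        have hchk : msCheckA (PySem.Dict.counter lb) la = false := by
          by_contra h
          rw [Bool.not_eq_false, msCheckA_iff] at h
          have := h c hca
          rw [PySem.Dict.contains_counter, List.contains_iff_mem] at this
          exact hcb this
        have hset : PySem.Set.equal (PySem.Set.ofList la) (PySem.Set.ofList lb) = false := by
          by_contra h
          rw [Bool.not_eq_false, PySem.Set.equal_iff] at h
          exact hcb ((PySem.Set.mem_ofList lb c).mp ((h c).mp ((PySem.Set.mem_ofList la c).mpr hca)))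
        simp [hchk, hset]
    · -- some char of b is missing from a: A's counting loop and B's set guard both give -1
      push_neg at hba
      obtain ⟨c, hcb, hca⟩ := hba
      have hc : (la.foldl (fun d c => d.insert c (1 : Int)) PySem.Dict.empty).contains c = false := by
        rw [Bool.eq_false_iff]
        intro h
        exact hca ((foldl_insert_one_mem la c).mp h)
      have hset : PySem.Set.equal (PySem.Set.ofList la) (PySem.Set.ofList lb) = false := by
        by_contra h
        rw [Bool.not_eq_false, PySem.Set.equal_iff] at h
        exact hca ((PySem.Set.mem_ofList la c).mp ((h c).mpr ((PySem.Set.mem_ofList lb c).mpr hcb)))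
      rw [msLoopB_none _ _ ⟨c, hcb, hc⟩]
      simp [hset]

-- ===== VERDICT (by name: the statement is the Claim_ definition above) =====
theorem makeSubstring_spec : Claim_equal_makeSubstring := by
  intro a b _
  unfold Spec_makeSubstring
  exact makeSubstring_eq_alt a b
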